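-- pv_equiv track=rewrite | github.com/pollomax847/plex-ratings-sync | playlists/auto_playlists_plexamp.py | create_rating_playlists
-- ===== SOURCE A (Python) =====
-- from typing import List, Dict, Optional, Tuple, Any
--
-- AUTO_PLAYLIST_PREFIX = ""
--
-- def create_rating_playlists(tracks: List[Dict]) -> Dict[str, List[Dict]]:
--     """Crée des playlists par note (5★, 4★, etc.)"""
--     rating_playlists = {}
--
--     for rating in [5, 4, 3, 2, 1]:
--         rated_tracks = [t for t in tracks if t['rating'] == rating * 2]  # Plex utilise 1-10
--         if rated_tracks:
--             playlist_name = f"{AUTO_PLAYLIST_PREFIX}⭐ {rating} étoiles ({len(rated_tracks)} titres)"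
--             rating_playlists[playlist_name] = rated_tracks
--
--     return rating_playlists
-- ===== SOURCE B (Python) =====
-- from typing import List, Dict
--
-- AUTO_PLAYLIST_PREFIX = ""
--
-- def create_rating_playlists(tracks: List[Dict]) -> Dict[str, List[Dict]]:
--     """Single pass into five explicit buckets, then emit the 5..1 entries."""
--     r5, r4, r3, r2, r1 = [], [], [], [], []
--     for t in tracks:
--         r = t['rating']
--         if r == 10:
--             r5.append(t)
--         elif r == 8:
--             r4.append(t)
--         elif r == 6:
--             r3.append(t)
--         elif r == 4:
--             r2.append(t)
--         elif r == 2: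
--             r1.append(t)
--     entries = []
--     for stars, bucket in ((5, r5), (4, r4), (3, r3), (2, r2), (1, r1)):
--         if bucket:
--             name = f"{AUTO_PLAYLIST_PREFIX}⭐ {stars} étoiles ({len(bucket)} titres)"
--             entries.append((name, bucket))
--     return dict(entries)
-- ===== Notes on version B (the rewrite author's own statement) =====
-- stated objective: alternative
-- what changed: Replaces five full filtering scans of the track list (one per star rating) with a single pass that dispatches each track into one of five explicit buckets via an if/elif chain, then emits the 5..1 entries and builds the dict once from that entry list.
import Mathlib
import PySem

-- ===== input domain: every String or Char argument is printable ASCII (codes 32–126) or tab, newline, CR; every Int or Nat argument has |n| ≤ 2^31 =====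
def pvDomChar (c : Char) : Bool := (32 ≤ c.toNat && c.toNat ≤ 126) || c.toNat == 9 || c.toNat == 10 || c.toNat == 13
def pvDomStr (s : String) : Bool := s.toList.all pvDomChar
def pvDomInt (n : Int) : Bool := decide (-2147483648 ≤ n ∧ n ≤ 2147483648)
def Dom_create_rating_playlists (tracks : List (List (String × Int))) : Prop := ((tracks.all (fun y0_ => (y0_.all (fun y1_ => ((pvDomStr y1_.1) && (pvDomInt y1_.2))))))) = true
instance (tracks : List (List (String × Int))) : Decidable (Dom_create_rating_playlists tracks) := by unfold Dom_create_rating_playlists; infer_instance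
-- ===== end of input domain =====

-- B replaces A's five filtering scans with a single dispatching pass into five
-- explicit buckets plus a direct construction of the 5..1 entry list (same value).

-- ===== PORT A =====
-- A: for rating in [5,4,3,2,1], scan the whole list filtering t['rating'] == rating*2,
-- inserting the non-empty playlists into a dict.
def create_rating_playlists (tracks : List (List (String × Int))) : List (String × List (List (String × Int))) :=
  (([5, 4, 3, 2, 1] : List Int).foldl (fun rp rating =>
    let rated := tracks.filter (fun t => (PySem.Dict.mk t).get? "rating" == some (rating * 2))
    if rated ≠ [] then
      rp.insert ("" ++ "⭐ " ++ PySem.Int.toStr rating ++ " étoiles (" ++ PySem.Int.toStr (rated.length : Int) ++ " titres)") rated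
    else rp)
    (PySem.Dict.empty : PySem.Dict String (List (List (String × Int))))).items

-- ===== PORT B =====
-- B: one pass dispatches each track into one of five buckets (if/elif chain on the
-- raw rating value, ported as the Option returned by get? — under Pre_ it is always
-- `some r`, matching Python exactly); then the 5..1 entries are emitted directly.
def pvDispatch (acc : List (List (String × Int)) × List (List (String × Int)) × List (List (String × Int)) × List (List (String × Int)) × List (List (String × Int)))
    (t : List (String × Int)) :
    List (List (String × Int)) × List (List (String × Int)) × List (List (String × Int)) × List (List (String × Int)) × List (List (String × Int)) :=
  let (r5, r4, r3, r2, r1) := acc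
  let r := (PySem.Dict.mk t).get? "rating"
  if r == some 10 then (r5 ++ [t], r4, r3, r2, r1)
  else if r == some 8 then (r5, r4 ++ [t], r3, r2, r1)
  else if r == some 6 then (r5, r4, r3 ++ [t], r2, r1)
  else if r == some 4 then (r5, r4, r3, r2 ++ [t], r1)
  else if r == some 2 then (r5, r4, r3, r2, r1 ++ [t])
  else (r5, r4, r3, r2, r1)

def pvEmit (stars : Int) (bucket : List (List (String × Int))) : List (String × List (List (String × Int))) :=
  if bucket = [] then []
  else [("" ++ "⭐ " ++ PySem.Int.toStr stars ++ " étoiles (" ++ PySem.Int.toStr (bucket.length : Int) ++ " titres)", bucket)]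

def create_rating_playlists_alt (tracks : List (List (String × Int))) : List (String × List (List (String × Int))) :=
  let (r5, r4, r3, r2, r1) := tracks.foldl pvDispatch ([], [], [], [], [])
  pvEmit 5 r5 ++ pvEmit 4 r4 ++ pvEmit 3 r3 ++ pvEmit 2 r2 ++ pvEmit 1 r1

-- ===== PRECONDITION & SPEC =====
-- Pre_ excludes exactly the inputs on which Python A raises KeyError: a track with no 'rating' key.
def Pre_create_rating_playlists (tracks : List (List (String × Int))) : Prop :=
  ∀ t ∈ tracks, (PySem.Dict.mk t).contains "rating" = true
instance (tracks : List (List (String × Int))) : Decidable (Pre_create_rating_playlists tracks) := by unfold Pre_create_rating_playlists; infer_instance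

def pvWitness_create_rating_playlists : (List (List (String × Int))) :=
  [[("rating", 10), ("id", 1)], [("rating", 8)], [("rating", 10)], [("rating", 7)]]

def Spec_create_rating_playlists (tracks : List (List (String × Int))) (out : List (String × List (List (String × Int)))) : Prop := out = create_rating_playlists_alt tracks
instance (tracks : List (List (String × Int))) (out : List (String × List (List (String × Int)))) : Decidable (Spec_create_rating_playlists tracks out) := by unfold Spec_create_rating_playlists; infer_instance

-- ===== CLAIM =====
def Claim_equal_create_rating_playlists : Prop := ∀ (tracks : List (List (String × Int))), Dom_create_rating_playlists tracks → Pre_create_rating_playlists tracks → Spec_create_rating_playlists tracks (create_rating_playlists tracks)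

-- ===== LEMMAS AND PROOFS =====

-- B's dispatch pass computes exactly the five filters of the list.
theorem pv_dispatch_eq (l : List (List (String × Int)))
    (a5 a4 a3 a2 a1 : List (List (String × Int))) :
    l.foldl pvDispatch (a5, a4, a3, a2, a1) =
      (a5 ++ l.filter (fun t => (PySem.Dict.mk t).get? "rating" == some 10),
       a4 ++ l.filter (fun t => (PySem.Dict.mk t).get? "rating" == some 8),
       a3 ++ l.filter (fun t => (PySem.Dict.mk t).get? "rating" == some 6),
       a2 ++ l.filter (fun t => (PySem.Dict.mk t).get? "rating" == some 4),
       a1 ++ l.filter (fun t => (PySem.Dict.mk t).get? "rating" == some 2)) := by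
  induction l generalizing a5 a4 a3 a2 a1 with
  | nil => simp
  | cons t l ih =>
    simp only [List.foldl_cons, pvDispatch, List.filter_cons]
    split_ifs with h1 h2 h3 h4 h5 <;>
      simp_all [List.append_assoc]

-- Two strings with unequal equal-length prefixes stay unequal after appending.
theorem pv_str_append_ne (a b x y : String)
    (hlen : a.toList.length = b.toList.length) (hne : a ≠ b) :
    a ++ x ≠ b ++ y := by
  intro h
  apply hne
  have h' : a.toList ++ x.toList = b.toList ++ y.toList := by
    have := congrArg String.toList h
    simpa using this
  have := (List.append_inj h' hlen).1
  exact String.toList_injective this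

-- A playlist name for `stars` (its fixed 13-char prefix includes the star digit).
theorem pv_name_ne (s s' : Int) (x y : String)
    (h : PySem.Int.toStr s ≠ PySem.Int.toStr s')
    (hl : (PySem.Int.toStr s).toList.length = (PySem.Int.toStr s').toList.length) :
    ("" ++ "⭐ " ++ PySem.Int.toStr s ++ " étoiles (" ++ x ++ " titres)") ≠
    ("" ++ "⭐ " ++ PySem.Int.toStr s' ++ " étoiles (" ++ y ++ " titres)") := by
  have e1 : ("" ++ "⭐ " ++ PySem.Int.toStr s ++ " étoiles (" ++ x ++ " titres)")
      = ("" ++ "⭐ " ++ PySem.Int.toStr s) ++ (" étoiles (" ++ x ++ " titres)") := by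
    simp [String.append_assoc]
  have e2 : ("" ++ "⭐ " ++ PySem.Int.toStr s' ++ " étoiles (" ++ y ++ " titres)")
      = ("" ++ "⭐ " ++ PySem.Int.toStr s') ++ (" étoiles (" ++ y ++ " titres)") := by
    simp [String.append_assoc]
  rw [e1, e2]
  apply pv_str_append_ne
  · simpa [PySem.Int.toList_toStr] using hl
  · intro hh
    apply h
    have hc := congrArg String.toList hh
    simp at hc
    apply String.toList_injective
    rw [PySem.Int.toList_toStr, PySem.Int.toList_toStr]
    exact hc

-- A's whole loop: conditional inserts of pairwise-distinct fresh keys append in order.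
theorem pv_fold_cond (l : List Int) (key : Int → String)
    (val : Int → List (List (String × Int)))
    (d : PySem.Dict String (List (List (String × Int))))
    (h : ∀ r ∈ l, d.contains (key r) = false)
    (hnd : (l.map key).Pairwise (· ≠ ·)) :
    (l.foldl (fun rp r => if val r ≠ [] then rp.insert (key r) (val r) else rp) d).items
      = d.items ++ l.flatMap (fun r => if val r ≠ [] then [(key r, val r)] else []) := by
  induction l generalizing d with
  | nil => simp
  | cons r l ih =>
    simp only [List.foldl_cons, List.flatMap_cons, List.pairwise_cons, List.map] at *
    obtain ⟨hr, hl'⟩ := hnd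
    have hfresh : ∀ r' ∈ l, (if val r ≠ [] then d.insert (key r) (val r) else d).contains (key r') = false := by
      intro r' hr'
      split_ifs
      · rw [PySem.Dict.contains_insert]
        have hne : key r' ≠ key r := fun e => (hr _ (List.mem_map_of_mem hr')) e.symm
        simp [hne, h r' (List.mem_cons_of_mem _ hr')]
      · exact h r' (List.mem_cons_of_mem _ hr')
    rw [ih _ hfresh hl']
    by_cases hv : val r = []
    · simp [hv]
    · rw [if_pos hv,
        show (d.insert (key r) (val r)).items = d.items ++ [(key r, val r)] from
          PySem.Dict.items_insert_of_not_contains d (val r) (h r (List.mem_cons_self ..))]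
      simp [hv, List.append_assoc]

-- ===== VERDICT =====
theorem create_rating_playlists_spec : Claim_equal_create_rating_playlists := by
  intro tracks _ _
  unfold Spec_create_rating_playlists create_rating_playlists create_rating_playlists_alt
  rw [pv_dispatch_eq]
  rw [pv_fold_cond ([5,4,3,2,1] : List Int)
      (fun r => "" ++ "⭐ " ++ PySem.Int.toStr r ++ " étoiles (" ++ PySem.Int.toStr ((tracks.filter (fun t => (PySem.Dict.mk t).get? "rating" == some (r * 2))).length : Int) ++ " titres)")
      (fun r => tracks.filter (fun t => (PySem.Dict.mk t).get? "rating" == some (r * 2)))]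
  · simp only [List.flatMap_cons, List.flatMap_nil, List.append_nil, List.nil_append,
      pvEmit, ne_eq, ite_not, PySem.Dict.empty]
    norm_num
  · intro r _; simp
  · refine List.Pairwise.map _ (fun a b h => pv_name_ne a b _ _ h.1 h.2)
      (?_ : ([5,4,3,2,1] : List Int).Pairwise (fun a b =>
        PySem.Int.toStr a ≠ PySem.Int.toStr b ∧
        (PySem.Int.toStr a).toList.length = (PySem.Int.toStr b).toList.length))
    decide
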